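-- pv_equiv track=rewrite | github.com/MrBrantCode/unitest_baseline | mut_generate/mist_train_cf/cf_95555/solution.py | delete_primes
-- ===== SOURCE A (Python) =====
-- import math
--
-- def is_prime(num):
--     if num < 2:
--         return False
--     for i in range(2, int(math.sqrt(num)) + 1):
--         if num % i == 0:
--             return False
--     return True
--
-- def delete_primes(arr, n):
--     primes = []
--     for i in range(min(n, len(arr))):
--         if is_prime(arr[i]):
--             primes.append(arr[i])
--     modified_arr = []
--     for num in arr:
--         if num not in primes:
--             modified_arr.append(num)
--     return modified_arr
-- ===== SOURCE B (Python) =====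
-- import math
--
-- def is_prime(num):
--     if num < 2:
--         return False
--     for i in range(2, int(math.sqrt(num)) + 1):
--         if num % i == 0:
--             return False
--     return True
--
-- def _in_prefix(arr, m, x):
--     for j in range(m):
--         if arr[j] == x:
--             return True
--     return False
--
-- def delete_primes(arr, n):
--     m = min(n, len(arr))
--     return [num for num in arr if not (is_prime(num) and _in_prefix(arr, m, num))]
-- ===== Notes on version B (the rewrite author's own statement) =====
-- stated objective: alternative
-- what changed: A precomputes a list of the primes found in the prefix and then filters by membership in that list; B keeps no primes collection and instead decides each element on the fly by re-scanning the prefix arr[:min(n,len(arr))] for an occurrence, dropping num iff is_prime(num) and it occurs there.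
import Mathlib
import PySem

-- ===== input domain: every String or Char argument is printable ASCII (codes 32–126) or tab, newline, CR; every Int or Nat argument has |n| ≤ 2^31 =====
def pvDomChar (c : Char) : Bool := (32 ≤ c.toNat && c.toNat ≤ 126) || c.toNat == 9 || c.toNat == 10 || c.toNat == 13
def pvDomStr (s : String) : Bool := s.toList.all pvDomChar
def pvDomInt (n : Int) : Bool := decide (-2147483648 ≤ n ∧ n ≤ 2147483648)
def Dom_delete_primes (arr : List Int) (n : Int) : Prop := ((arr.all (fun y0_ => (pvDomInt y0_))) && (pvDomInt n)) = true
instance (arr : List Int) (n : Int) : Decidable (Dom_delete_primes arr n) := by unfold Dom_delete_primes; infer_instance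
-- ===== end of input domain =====

-- ===== PORT A =====
-- One honest line: B replaces A's precomputed prime-list + membership filter by a single
-- filtering pass that re-scans the prefix for each element (alternative decomposition, no speed claim).
-- int(math.sqrt(num)) is ported as Nat.sqrt: exact for 0 <= num <= 2^31 (float sqrt is correctly
-- rounded and the result fits well within double precision there).
def pyIsPrime (num : Int) : Bool :=
  if num < 2 then false
  else (PySem.List.pyRange 2 ((Nat.sqrt num.toNat : Int) + 1) 1).all
    (fun i => !(PySem.Int.mod num i == 0))

def delete_primes (arr : List Int) (n : Int) : List Int :=
  let primes := (PySem.List.pyRange 0 (min n (arr.length : Int)) 1).foldl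
    (fun acc i => if pyIsPrime (PySem.List.pyGetD arr i 0) then acc ++ [PySem.List.pyGetD arr i 0] else acc) []
  arr.foldl (fun acc num => if primes.contains num then acc else acc ++ [num]) []

-- ===== PORT B =====
def pyIsPrimeAlt (num : Int) : Bool :=
  if num < 2 then false
  else (PySem.List.pyRange 2 ((Nat.sqrt num.toNat : Int) + 1) 1).all
    (fun i => !(PySem.Int.mod num i == 0))

def inPrefix (arr : List Int) (m : Int) (x : Int) : Bool :=
  (PySem.List.pyRange 0 m 1).any (fun j => PySem.List.pyGetD arr j 0 == x)

def delete_primes_alt (arr : List Int) (n : Int) : List Int :=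
  let m := min n (arr.length : Int)
  arr.filter (fun num => !(pyIsPrimeAlt num && inPrefix arr m num))

-- ===== PRECONDITION & SPEC =====
def Spec_delete_primes (arr : List Int) (n : Int) (out : List Int) : Prop := out = delete_primes_alt arr n
instance (arr : List Int) (n : Int) (out : List Int) : Decidable (Spec_delete_primes arr n out) := by unfold Spec_delete_primes; infer_instance

-- ===== CLAIM (what is proved, stated in full; the proofs are below) =====
def Claim_equal_delete_primes : Prop := ∀ (arr : List Int) (n : Int), Dom_delete_primes arr n → Spec_delete_primes arr n (delete_primes arr n)

-- ===== LEMMAS AND PROOFS =====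

theorem pyIsPrimeAlt_eq : pyIsPrimeAlt = pyIsPrime := rfl

-- the prefix arr[0..m) read through indices equals List.take m
theorem map_pyGetD_range_take (arr : List Int) (m : Nat) (h : m ≤ arr.length) :
    (PySem.List.pyRange 0 (m : Int) 1).map (fun i => PySem.List.pyGetD arr i 0) = arr.take m := by
  induction m with
  | zero => simp [PySem.List.pyRange_one_eq_nil]
  | succ k ih =>
    have hk : k < arr.length := by omega
    push_cast
    rw [PySem.List.pyRange_one_succ_right (by positivity), List.map_append, ih (by omega),
      List.take_add_one, List.getElem?_eq_getElem hk]
    simp [PySem.List.pyGetD_natCast, List.getD_eq_getElem?_getD, List.getElem?_eq_getElem hk]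

-- A's first loop builds exactly the primes of the prefix
theorem primes_eq (arr : List Int) (m : Nat) (h : m ≤ arr.length) :
    (PySem.List.pyRange 0 (m : Int) 1).foldl
      (fun acc i => if pyIsPrime (PySem.List.pyGetD arr i 0) then acc ++ [PySem.List.pyGetD arr i 0] else acc) []
    = (arr.take m).filter pyIsPrime := by
  have h1 := PySem.List.foldl_append_if pyIsPrime id (arr.take m) []
  rw [← map_pyGetD_range_take arr m h, List.foldl_map] at h1
  simpa [map_pyGetD_range_take arr m h] using h1

-- A's second loop is a filter with the negated condition
theorem foldl_skip_if (p : Int → Bool) (l acc : List Int) :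
    l.foldl (fun acc x => if p x then acc else acc ++ [x]) acc = acc ++ l.filter (fun x => !p x) := by
  have hfun : (fun (acc : List Int) x => if p x then acc else acc ++ [x])
      = (fun acc x => if (!p x) then acc ++ [id x] else acc) := by
    funext acc x; cases hp : p x <;> simp_all
  rw [hfun]
  simpa using PySem.List.foldl_append_if (fun x => !p x) id l acc

-- B's prefix rescan decides membership in List.take m
theorem inPrefix_eq (arr : List Int) (m : Nat) (h : m ≤ arr.length) (x : Int) :
    inPrefix arr (m : Int) x = (arr.take m).contains x := by
  unfold inPrefix
  rw [← map_pyGetD_range_take arr m h, Bool.eq_iff_iff]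
  simp [List.contains_eq_mem, List.mem_map]

-- ===== VERDICT (by name: the statement is the Claim_ definition above) =====
theorem delete_primes_spec : Claim_equal_delete_primes := by
  intro arr n _
  unfold Spec_delete_primes delete_primes delete_primes_alt
  set M := min n (arr.length : Int) with hM
  have hkle : M.toNat ≤ arr.length := by omega
  have hrange : PySem.List.pyRange 0 M 1 = PySem.List.pyRange 0 (M.toNat : Int) 1 := by
    by_cases h0 : 0 ≤ M
    · congr 1; omega
    · rw [PySem.List.pyRange_one_eq_nil (by omega), PySem.List.pyRange_one_eq_nil (by omega)]
  have hpre : ∀ x, inPrefix arr M x = inPrefix arr (M.toNat : Int) x := by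
    intro x; unfold inPrefix; rw [hrange]
  simp only [hrange, hpre]
  rw [primes_eq arr M.toNat hkle, foldl_skip_if]
  simp only [inPrefix_eq arr M.toNat hkle, List.nil_append]
  apply List.filter_congr
  intro x hx
  rw [Bool.eq_iff_iff]
  simp [List.contains_eq_mem, List.mem_filter, pyIsPrimeAlt_eq, and_comm]
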